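-- pv_equiv track=rewrite | github.com/idvorkin/idvorkin.github.io | old_blog/transform_blogger_export.py | excerpt_for_content
-- ===== SOURCE A (Python) =====
-- def excerpt_for_content(content):
--     paragraphs = content.split("\n")
--
--     # return first good paragraph
--     out_paragraphs=[]
--     min_excerpt_len = 200
--     excerpt = ""
--
--     for p in paragraphs:
--         p = p.strip(" ")
--         isWhiteSpace = len(p.strip("_").strip("*")) == 0
--         if isWhiteSpace:
--             continue
--
--         isItalicsLine = p.startswith("_") and p.endswith("_")  # usually just a note
--         if isItalicsLine:
--             continue
--
--         excerpt += p
--         out_paragraphs += [p]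
--
--         if len(excerpt) > min_excerpt_len:
--             break
--
--     return "\n\n".join(out_paragraphs)
-- ===== SOURCE B (Python) =====
-- def excerpt_for_content(content):
--     lines = content.split("\n")
--
--     def next_good(i):
--         # advance past non-good lines; return (index, cleaned line) or (len, None)
--         while i < len(lines):
--             q = lines[i].strip(" ")
--             if q.strip("_").strip("*") and not (q.startswith("_") and q.endswith("_")):
--                 return i, q
--             i += 1
--         return i, None
--
--     def build(i, remaining):
--         # recursively build the joined excerpt directly, counting the budget down
--         i, q = next_good(i)
--         if q is None:
--             return ""
--         if len(q) >= remaining: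
--             return q  # this paragraph exhausts the budget (inclusive)
--         tail = build(i + 1, remaining - len(q))
--         return q if tail == "" else q + "\n\n" + tail
--
--     return build(0, 201)
-- ===== Notes on version B (the rewrite author's own statement) =====
-- stated objective: alternative
-- what changed: Replaces A's iterative loop (paragraph list plus running excerpt string, joined at the end) with a recursion that builds the joined excerpt directly — a scanner skips bad lines and the recursion counts a 201-character budget down, concatenating separators as it returns, with no list and no final join.
import Mathlib
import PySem

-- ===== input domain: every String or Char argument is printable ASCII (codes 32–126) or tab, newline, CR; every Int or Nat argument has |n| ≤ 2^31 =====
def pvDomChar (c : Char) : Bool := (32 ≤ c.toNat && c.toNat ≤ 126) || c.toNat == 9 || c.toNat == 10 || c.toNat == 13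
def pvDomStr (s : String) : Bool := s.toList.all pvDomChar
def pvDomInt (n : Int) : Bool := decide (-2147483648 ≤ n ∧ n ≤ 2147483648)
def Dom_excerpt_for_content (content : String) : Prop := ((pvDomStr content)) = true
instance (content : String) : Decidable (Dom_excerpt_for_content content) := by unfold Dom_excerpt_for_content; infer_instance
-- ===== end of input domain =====

-- B replaces A's iterative accumulate-and-break loop (paragraph list + running excerpt, joined
-- at the end) by a recursion that builds the joined excerpt string directly, skipping bad lines
-- with a scanner and counting a 201-character budget down; same return value.

-- ===== PORT A =====
-- A's for-loop: state = (excerpt, out_paragraphs); break when len(excerpt) > 200.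
def pvALoop : List (List Char) → List Char → List (List Char) → List (List Char)
  | [], _, out => out
  | p :: rest, ex, out =>
    let p := PySem.Chars.stripChars p [' ']
    if (PySem.Chars.stripChars (PySem.Chars.stripChars p ['_']) ['*']).length = 0 then
      pvALoop rest ex out
    else if PySem.Chars.startswith p ['_'] && PySem.Chars.endswith p ['_'] then
      pvALoop rest ex out
    else
      let ex := ex ++ p
      let out := out ++ [p]
      if ex.length > 200 then out else pvALoop rest ex out

def excerpt_for_content (content : String) : String :=
  let paragraphs := PySem.Chars.splitOn content.toList ['\n']
  String.mk (PySem.Chars.join ['\n', '\n'] (pvALoop paragraphs [] []))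

-- ===== PORT B =====
-- B's next_good scanner: skip non-good lines, return the cleaned line and the remaining lines.
def pvNextGood : List (List Char) → Option (List Char × List (List Char))
  | [] => none
  | p :: rest =>
    let q := PySem.Chars.stripChars p [' ']
    if (PySem.Chars.stripChars (PySem.Chars.stripChars q ['_']) ['*']).length ≠ 0
        && !(PySem.Chars.startswith q ['_'] && PySem.Chars.endswith q ['_']) then
      some (q, rest)
    else
      pvNextGood rest

theorem pvNextGood_lt : ∀ (ls : List (List Char)) (q : List Char) (rest : List (List Char)),
    pvNextGood ls = some (q, rest) → rest.length < ls.length := by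
  intro ls
  induction ls with
  | nil => intro q rest h; simp [pvNextGood] at h
  | cons p tl ih =>
    intro q rest h
    simp only [pvNextGood] at h
    split at h
    · cases h; simp
    · exact Nat.lt_trans (ih q rest h) (by simp)

-- B's build: recursively emit the joined excerpt, counting the budget down.
def pvBuild (ls : List (List Char)) (remaining : Int) : List Char :=
  match h : pvNextGood ls with
  | none => []
  | some (q, rest) =>
    if (q.length : Int) ≥ remaining then q
    else
      let tail := pvBuild rest (remaining - q.length)
      if tail = [] then q else q ++ '\n' :: '\n' :: tail
termination_by ls.length
decreasing_by exact pvNextGood_lt ls q rest h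

def excerpt_for_content_alt (content : String) : String :=
  String.mk (pvBuild (PySem.Chars.splitOn content.toList ['\n']) 201)

-- ===== PRECONDITION & SPEC =====
def Spec_excerpt_for_content (content : String) (out : String) : Prop := out = excerpt_for_content_alt content
instance (content : String) (out : String) : Decidable (Spec_excerpt_for_content content out) := by unfold Spec_excerpt_for_content; infer_instance

-- ===== CLAIM (what is proved, stated in full; the proofs are below) =====
def Claim_equal_excerpt_for_content : Prop := ∀ (content : String), Dom_excerpt_for_content content → Spec_excerpt_for_content content (excerpt_for_content content)

-- ===== LEMMAS AND PROOFS =====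

theorem pvALoop_out (ps : List (List Char)) : ∀ (ex : List Char) (out : List (List Char)),
    pvALoop ps ex out = out ++ pvALoop ps ex [] := by
  induction ps with
  | nil => intro ex out; simp [pvALoop]
  | cons p rest ih =>
    intro ex out
    simp only [pvALoop]
    split
    · exact ih ex out
    · split
      · exact ih ex out
      · split
        · simp
        · rw [ih _ (out ++ _), ih _ ([] ++ _)]; simp

theorem pvALoop_mem_ne_nil (ps : List (List Char)) : ∀ (ex : List Char),
    ∀ q ∈ pvALoop ps ex [], q ≠ [] := by
  induction ps with
  | nil => intro ex q h; simp [pvALoop] at h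
  | cons p rest ih =>
    intro ex q h
    simp only [pvALoop] at h
    split at h
    · exact ih ex q h
    · rename_i hw
      split at h
      · exact ih ex q h
      · have hne : PySem.Chars.stripChars p [' '] ≠ [] := by
          intro hnil
          apply hw
          rw [hnil]
          decide
        split at h
        · simp at h; subst h; exact hne
        · rw [pvALoop_out] at h
          simp at h
          rcases h with h | h
          · subst h; exact hne
          · exact ih _ q h

theorem join_two_ne_nil (q : List Char) (L : List (List Char)) (hq : q ≠ []) :
    PySem.Chars.join ['\n', '\n'] (q :: L) ≠ [] := by
  cases L with
  | nil => rw [PySem.Chars.join_singleton]; exact hq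
  | cons b L' =>
    rw [PySem.Chars.join_cons_cons]
    simp [hq]

theorem pvBuild_none (ls : List (List Char)) (r : Int) (h : pvNextGood ls = none) :
    pvBuild ls r = [] := by
  rw [pvBuild]
  split
  · rfl
  · rename_i q' rest' h'; rw [h] at h'; cases h'

theorem pvBuild_some' (ls : List (List Char)) (q : List Char) (rest : List (List Char)) (r : Int)
    (h : pvNextGood ls = some (q, rest)) :
    pvBuild ls r = if (q.length : Int) ≥ r then q
      else if pvBuild rest (r - q.length) = [] then q
      else q ++ '\n' :: '\n' :: pvBuild rest (r - q.length) := by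
  rw [pvBuild]
  split
  · rename_i h'; rw [h] at h'; cases h'
  · rename_i q' rest' h'; rw [h] at h'; cases h'; rfl

theorem pvBuild_congr (ls ls' : List (List Char)) (r : Int)
    (h : pvNextGood ls = pvNextGood ls') : pvBuild ls r = pvBuild ls' r := by
  cases hn : pvNextGood ls' with
  | none => rw [pvBuild_none ls r (h.trans hn), pvBuild_none ls' r hn]
  | some v =>
    obtain ⟨q, rest⟩ := v
    rw [pvBuild_some' ls q rest r (h.trans hn), pvBuild_some' ls' q rest r hn]

theorem pvMain (ps : List (List Char)) : ∀ (ex : List Char),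
    PySem.Chars.join ['\n', '\n'] (pvALoop ps ex []) = pvBuild ps (201 - (ex.length : Int)) := by
  induction ps with
  | nil =>
    intro ex
    rw [pvBuild_none [] _ rfl]
    simp [pvALoop, PySem.Chars.join, List.intercalate]
  | cons p rest ih =>
    intro ex
    by_cases hw : (PySem.Chars.stripChars (PySem.Chars.stripChars
        (PySem.Chars.stripChars p [' ']) ['_']) ['*']).length = 0
    · -- whitespace line: both skip it
      have hA : pvALoop (p :: rest) ex [] = pvALoop rest ex [] := by
        simp only [pvALoop]; rw [if_pos hw]
      have hN : pvNextGood (p :: rest) = pvNextGood rest := by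
        simp only [pvNextGood]
        rw [if_neg (by simp [hw])]
      rw [hA, ih, pvBuild_congr (p :: rest) rest _ hN]
    · by_cases hi : (PySem.Chars.startswith (PySem.Chars.stripChars p [' ']) ['_']
          && PySem.Chars.endswith (PySem.Chars.stripChars p [' ']) ['_']) = true
      · -- italics line: both skip it
        have hA : pvALoop (p :: rest) ex [] = pvALoop rest ex [] := by
          simp only [pvALoop]; rw [if_neg hw, if_pos hi]
        have hN : pvNextGood (p :: rest) = pvNextGood rest := by
          simp only [pvNextGood]
          rw [if_neg (by simp [hi])]
        rw [hA, ih, pvBuild_congr (p :: rest) rest _ hN]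
      · -- good line
        have hN : pvNextGood (p :: rest) = some (PySem.Chars.stripChars p [' '], rest) := by
          simp only [pvNextGood]
          rw [if_pos (by simp [hw, hi])]
        have hA : pvALoop (p :: rest) ex [] =
            if (ex ++ PySem.Chars.stripChars p [' ']).length > 200
            then [PySem.Chars.stripChars p [' ']]
            else [PySem.Chars.stripChars p [' ']] ++ pvALoop rest (ex ++ PySem.Chars.stripChars p [' ']) [] := by
          simp only [pvALoop]
          rw [if_neg hw, if_neg hi]
          split
          · simp
          · rw [pvALoop_out]; simp
        have hqne : PySem.Chars.stripChars p [' '] ≠ [] := by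
          intro hnil
          apply hw
          rw [hnil]
          decide
        rw [hA, pvBuild_some' _ _ _ _ hN]
        by_cases hb : (ex ++ PySem.Chars.stripChars p [' ']).length > 200
        · rw [if_pos hb, if_pos (by simp at hb ⊢; omega)]
          exact PySem.Chars.join_singleton _ _
        · rw [if_neg hb, if_neg (by simp at hb ⊢; omega)]
          have hrem : (201 : Int) - (ex.length : Int) - ((PySem.Chars.stripChars p [' ']).length : Int)
              = 201 - (((ex ++ PySem.Chars.stripChars p [' ']).length : Nat) : Int) := by
            simp only [List.length_append]
            push_cast
            ring
          rw [hrem, ← ih (ex ++ PySem.Chars.stripChars p [' '])]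
          cases hL : pvALoop rest (ex ++ PySem.Chars.stripChars p [' ']) [] with
          | nil =>
            rw [if_pos (by simp [PySem.Chars.join, List.intercalate])]
            exact PySem.Chars.join_singleton _ _
          | cons b L' =>
            have hbne : b ≠ [] :=
              pvALoop_mem_ne_nil rest (ex ++ PySem.Chars.stripChars p [' ']) b (by rw [hL]; simp)
            rw [if_neg (join_two_ne_nil b L' hbne)]
            simp only [List.singleton_append]
            rw [PySem.Chars.join_cons_cons]
            simp

-- ===== VERDICT (by name: the statement is the Claim_ definition above) =====
theorem excerpt_for_content_spec : Claim_equal_excerpt_for_content := by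
  intro content _
  show _ = _
  simp only [excerpt_for_content, excerpt_for_content_alt]
  rw [pvMain]
  norm_num
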